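-- pv_equiv track=rewrite | github.com/abyss93/Masamune | orc.py | check_for_duplicate_content_type_header
-- ===== SOURCE A (Python) =====
-- def check_for_duplicate_content_type_header(p_headers):
--     result = ""
--     for h_tuple in p_headers:
--         header_key = h_tuple[0]
--         header_value = h_tuple[1]
--         if header_key != "Content-Type":
--             continue
--         result = header_value
--         if "boundary" in header_value:
--             return header_value
--     return result
-- ===== SOURCE B (Python) =====
-- def check_for_duplicate_content_type_header(p_headers):
--     # Right-fold recursion: for each suffix compute the pair
--     # (first value containing "boundary" or None, last Content-Type value or None).
--     def rec(i):
--         if i == len(p_headers):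
--             return (None, None)
--         b, last = rec(i + 1)
--         h = p_headers[i]
--         if h[0] == "Content-Type":
--             if "boundary" in h[1]:
--                 b = h[1]
--             if last is None:
--                 last = h[1]
--         return (b, last)
--     b, last = rec(0)
--     return b if b is not None else (last if last is not None else "")
-- ===== Notes on version B (the rewrite author's own statement) =====
-- stated objective: alternative
-- what changed: Replaces A's left-to-right accumulator loop with early return by a right-fold recursion over the list that computes, for each suffix, a pair (first boundary-containing value, last Content-Type value) and combines the head into that pair; the answer is read off the pair at the end with no early exit.
import Mathlib
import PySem

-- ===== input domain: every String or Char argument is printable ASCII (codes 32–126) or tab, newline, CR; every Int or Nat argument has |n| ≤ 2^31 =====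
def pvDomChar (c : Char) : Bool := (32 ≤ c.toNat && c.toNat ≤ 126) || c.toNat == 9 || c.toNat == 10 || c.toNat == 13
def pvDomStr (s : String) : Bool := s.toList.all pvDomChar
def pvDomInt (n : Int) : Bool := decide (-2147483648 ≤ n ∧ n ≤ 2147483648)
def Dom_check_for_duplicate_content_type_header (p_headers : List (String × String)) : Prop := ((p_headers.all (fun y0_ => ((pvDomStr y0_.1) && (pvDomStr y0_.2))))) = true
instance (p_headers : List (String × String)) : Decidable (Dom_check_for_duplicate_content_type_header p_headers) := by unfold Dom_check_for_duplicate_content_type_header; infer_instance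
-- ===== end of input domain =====

-- B replaces A's accumulator loop (with early return) by a right-fold recursion
-- computing a (first-boundary-value, last-Content-Type-value) pair; same return value.


-- ===== PORT A =====
-- A: one left-to-right pass with an accumulator; returns immediately on a value containing "boundary".
def goA_cfd : List (String × String) → String → String
  | [], result => result
  | h :: t, result =>
    if h.1 ≠ "Content-Type" then goA_cfd t result
    else if PySem.Str.isIn "boundary" h.2 then h.2
    else goA_cfd t h.2

def check_for_duplicate_content_type_header (p_headers : List (String × String)) : String :=
  goA_cfd p_headers ""

-- ===== PORT B =====
-- B: right-fold recursion; for each suffix compute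
-- (first value containing "boundary" or none, last Content-Type value or none).
def recB_cfd : List (String × String) → Option String × Option String
  | [] => (none, none)
  | h :: t =>
    let p := recB_cfd t
    if h.1 == "Content-Type" then
      ((if PySem.Str.isIn "boundary" h.2 then some h.2 else p.1),
       (if p.2.isNone then some h.2 else p.2))
    else p

def check_for_duplicate_content_type_header_alt (p_headers : List (String × String)) : String :=
  let p := recB_cfd p_headers
  match p.1 with
  | some v => v
  | none => match p.2 with
            | some v => v
            | none => ""

-- ===== PRECONDITION & SPEC =====
def Spec_check_for_duplicate_content_type_header (p_headers : List (String × String)) (out : String) : Prop := out = check_for_duplicate_content_type_header_alt p_headers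
instance (p_headers : List (String × String)) (out : String) : Decidable (Spec_check_for_duplicate_content_type_header p_headers out) := by unfold Spec_check_for_duplicate_content_type_header; infer_instance

-- ===== CLAIM (what is proved, stated in full; the proofs are below) =====
def Claim_equal_check_for_duplicate_content_type_header : Prop := ∀ (p_headers : List (String × String)), Dom_check_for_duplicate_content_type_header p_headers → Spec_check_for_duplicate_content_type_header p_headers (check_for_duplicate_content_type_header p_headers)

-- ===== LEMMAS AND PROOFS =====
-- A's loop with accumulator r equals reading B's pair off with fallback r.
theorem goA_cfd_eq (hs : List (String × String)) (r : String) :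
    goA_cfd hs r = ((recB_cfd hs).1.getD ((recB_cfd hs).2.getD r)) := by
  induction hs generalizing r with
  | nil => rfl
  | cons h t ih =>
    by_cases hk : h.1 = "Content-Type"
    · by_cases hb : PySem.Str.isIn "boundary" h.2 = true
      · have hbC : PySem.Chars.isIn ['b','o','u','n','d','a','r','y'] h.2.toList = true := by
          simpa using hb
        simp [goA_cfd, recB_cfd, hk, hbC]
      · have hbC : PySem.Chars.isIn ['b','o','u','n','d','a','r','y'] h.2.toList = false := by
          simpa using hb
        rw [show goA_cfd (h :: t) r = goA_cfd t h.2 by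
            simp [goA_cfd, hk, hbC], ih h.2]
        cases hp2 : (recB_cfd t).2 with
        | none => simp [recB_cfd, hk, hbC, hp2]
        | some v => simp [recB_cfd, hk, hbC, hp2]
    · rw [show goA_cfd (h :: t) r = goA_cfd t r by simp [goA_cfd, hk], ih r]
      simp [recB_cfd, hk]

-- ===== VERDICT (by name: the statement is the Claim_ definition above) =====
theorem check_for_duplicate_content_type_header_spec : Claim_equal_check_for_duplicate_content_type_header := by
  intro hs _
  unfold Spec_check_for_duplicate_content_type_header check_for_duplicate_content_type_header check_for_duplicate_content_type_header_alt
  rw [goA_cfd_eq hs ""]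
  cases h1 : (recB_cfd hs).1 <;> cases h2 : (recB_cfd hs).2 <;> simp [h1, h2]
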